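-- pv_equiv track=rewrite | github.com/remyimt/piseduce_webui | api/tool.py | sort_by_name
-- ===== SOURCE A (Python) =====
-- def sort_by_name(named_dict):
--     result = {}
--     names = {}
--     for name in named_dict:
--         key_name = ""
--         if "-" in name:
--             key_name = name.split("-")[0]
--         else:
--             key_name = name
--         if key_name not in names:
--             names[key_name] = []
--         names[key_name].append(name)
--     for n_str in sorted(names):
--         if len(names[n_str]) > 1:
--             nb_sorted = sorted(names[n_str], key=lambda nb: int(nb.split("-")[1]))
--             for n in nb_sorted:
--                 result[n] = named_dict[n]
--         else:
--             key = names[n_str][0]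
--             result[key] = named_dict[key]
--     return result
-- ===== SOURCE B (Python) =====
-- def sort_by_name(named_dict):
--     def prefix(n):
--         return n.split("-")[0]
--     counts = {}
--     for n in named_dict:
--         p = prefix(n)
--         counts[p] = counts.get(p, 0) + 1
--     def key(kv):
--         p = prefix(kv[0])
--         return (p, int(kv[0].split("-")[1]) if counts[p] > 1 else 0)
--     return dict(sorted(named_dict.items(), key=key))
-- ===== Notes on version B (the rewrite author's own statement) =====
-- stated objective: alternative
-- what changed: A builds a dict of prefix buckets and then sorts each multi-member bucket by its numeric suffix inside a walk over the sorted prefixes; B instead makes one counting pass over the prefixes and produces the result with a single stable global sort of the items under the composite key (prefix, suffix-if-the-prefix-is-shared), relying on sort stability instead of explicit grouping.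
import Mathlib
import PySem

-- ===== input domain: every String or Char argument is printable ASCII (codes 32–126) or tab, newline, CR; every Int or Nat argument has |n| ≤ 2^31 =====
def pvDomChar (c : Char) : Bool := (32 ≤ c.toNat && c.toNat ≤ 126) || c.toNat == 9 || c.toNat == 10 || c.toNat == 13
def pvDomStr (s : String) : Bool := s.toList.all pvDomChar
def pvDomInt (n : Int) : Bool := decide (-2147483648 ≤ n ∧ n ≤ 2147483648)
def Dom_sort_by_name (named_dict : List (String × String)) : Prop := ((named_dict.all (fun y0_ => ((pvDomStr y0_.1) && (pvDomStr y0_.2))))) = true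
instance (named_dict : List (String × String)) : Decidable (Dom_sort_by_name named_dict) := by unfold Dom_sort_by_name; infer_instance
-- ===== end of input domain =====

-- B replaces A's explicit bucket-grouping plus per-bucket numeric sort by one counting pass and a
-- single stable global sort under the composite key (prefix, numeric suffix); same values, different decomposition.

-- ===== PORT A =====
-- Literal port of A: group the names by prefix into a dict of lists, then walk the sorted
-- prefixes, sorting each multi-member bucket by its parsed numeric suffix.
def sort_by_name (named_dict : List (String × String)) : List (String × String) :=
  let d := PySem.Dict.ofList named_dict
  let names : PySem.Dict String (List String) :=
    named_dict.foldl (fun names kv =>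
      let name := kv.1
      let key_name : String :=
        if PySem.Str.isIn "-" name then PySem.List.pyGetD ((PySem.Str.split? name "-").getD []) 0 ""
        else name
      let names := if names.contains key_name then names else names.insert key_name []
      names.modify key_name [] (fun l => l ++ [name])) PySem.Dict.empty
  let result : PySem.Dict String String :=
    (PySem.List.sorted names.keys (fun x => x) false).foldl (fun result n_str =>
      let grp := names.getD n_str []
      if 1 < grp.length then
        let nb_sorted := PySem.List.sorted grp
          (fun nb => (PySem.Int.ofStr? (PySem.List.pyGetD ((PySem.Str.split? nb "-").getD []) 1 "")).getD 0) false
        nb_sorted.foldl (fun result n => result.insert n (d.getD n "")) result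
      else
        let key := PySem.List.pyGetD grp 0 ""
        result.insert key (d.getD key "")) PySem.Dict.empty
  result.items

-- ===== PORT B =====
-- prefix(n) = n.split("-")[0] if "-" in n else n
def pvPref (n : String) : String :=
  if PySem.Str.isIn "-" n then PySem.List.pyGetD ((PySem.Str.split? n "-").getD []) 0 ""
  else n

-- int(n.split("-")[1])  (total form; only used under Pre_, where the parse succeeds)
def pvSufInt (n : String) : Int :=
  (PySem.Int.ofStr? (PySem.List.pyGetD ((PySem.Str.split? n "-").getD []) 1 "")).getD 0

-- Port of B: one counting pass over the prefixes, then a single stable sort of the items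
-- under the composite key (prefix, suffix-if-grouped), re-wrapped as a dict.
def sort_by_name_alt (named_dict : List (String × String)) : List (String × String) :=
  let counts : PySem.Dict String Int :=
    named_dict.foldl (fun counts kv =>
      counts.insert (pvPref kv.1) (counts.getD (pvPref kv.1) 0 + 1)) PySem.Dict.empty
  (PySem.Dict.ofList
    (PySem.List.sorted2 named_dict
      (fun kv => pvPref kv.1)
      (fun kv => if 1 < counts.getD (pvPref kv.1) 0 then pvSufInt kv.1 else 0) false)).items

-- ===== PRECONDITION & SPEC =====
-- Pre_ excludes (a) inputs on which A raises: a name whose prefix group has more than one member but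
-- whose text after the first "-" is not an int literal (IndexError/ValueError in A's inner sort), and
-- (b) association lists with duplicate keys, which do not arise from a Python dict argument at all.
def Pre_sort_by_name (named_dict : List (String × String)) : Prop :=
  (named_dict.map (fun kv => kv.1)).Nodup ∧
  ∀ kv ∈ named_dict,
    1 < (named_dict.map (fun kv' => pvPref kv'.1)).count (pvPref kv.1) →
    (PySem.Int.ofStr? (PySem.List.pyGetD ((PySem.Str.split? kv.1 "-").getD []) 1 "")).isSome = true
instance (named_dict : List (String × String)) : Decidable (Pre_sort_by_name named_dict) := by
  unfold Pre_sort_by_name; infer_instance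

def pvWitness_sort_by_name : (List (String × String)) :=
  [("node-2", "x"), ("node-1", "y"), ("a", "z")]

def Spec_sort_by_name (named_dict : List (String × String)) (out : List (String × String)) : Prop :=
  out = sort_by_name_alt named_dict
instance (named_dict : List (String × String)) (out : List (String × String)) :
    Decidable (Spec_sort_by_name named_dict out) := by unfold Spec_sort_by_name; infer_instance

-- ===== CLAIM (what is proved, stated in full; the proofs are below) =====
def Claim_equal_sort_by_name : Prop := ∀ (named_dict : List (String × String)),
  Dom_sort_by_name named_dict → Pre_sort_by_name named_dict →
  Spec_sort_by_name named_dict (sort_by_name named_dict)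

-- ===== LEMMAS AND PROOFS =====

-- abbreviations used only by the proofs
def pvKeys (nd : List (String × String)) : List String := nd.map (fun kv => kv.1)
def pvLkp (nd : List (String × String)) (n : String) : String := (PySem.Dict.ofList nd).getD n ""
def pvSB (nd : List (String × String)) (n : String) : Int :=
  if 1 < ((pvKeys nd).map pvPref).count (pvPref n) then pvSufInt n else 0
def pvGrp (xs : List String) (q : String) : List String := xs.filter (fun n => pvPref n == q)

theorem pv_insertBy_middle {α : Type} (before : α → α → Bool) (x : α) (A B C : List α)
    (hA : ∀ y ∈ A, before x y = false) (hC : ∀ y ∈ C, before x y = true) :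
    PySem.List.insertBy before x (A ++ (B ++ C)) = A ++ (PySem.List.insertBy before x B ++ C) := by
  induction A with
  | cons a A ih =>
    have h1 : before x a = false := hA a (by simp)
    simp only [List.cons_append, PySem.List.insertBy, h1]
    simp only [ih (fun y hy => hA y (by simp [hy]))]
    simp
  | nil =>
    simp only [List.nil_append]
    induction B with
    | cons b B ihB =>
      by_cases hb : before x b = true
      · simp [PySem.List.insertBy, hb]
      · simp only [Bool.not_eq_true] at hb
        simp only [List.cons_append, PySem.List.insertBy, hb]
        simp [ihB]
    | nil =>
      cases C with
      | nil => simp [PySem.List.insertBy]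
      | cons c C =>
        have : before x c = true := hC c (by simp)
        simp [PySem.List.insertBy, this]

theorem pv_insertBy_congr {α : Type} (b1 b2 : α → α → Bool) (x : α) (l : List α)
    (h : ∀ y ∈ l, b1 x y = b2 x y) :
    PySem.List.insertBy b1 x l = PySem.List.insertBy b2 x l := by
  induction l with
  | nil => rfl
  | cons a l ih =>
    have ha := h a (by simp)
    simp only [PySem.List.insertBy, ha]
    rw [ih (fun y hy => h y (by simp [hy]))]

theorem pv_map_insertBy {α β : Type} (f : α → β) (b : β → β → Bool) (x : α) (l : List α) :
    PySem.List.insertBy b (f x) (l.map f) =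
      (PySem.List.insertBy (fun a c => b (f a) (f c)) x l).map f := by
  induction l with
  | nil => rfl
  | cons a l ih =>
    by_cases hb : b (f x) (f a) = true
    · simp [PySem.List.insertBy, hb]
    · simp only [Bool.not_eq_true] at hb
      simp [PySem.List.insertBy, hb, ih]

theorem pv_sorted_append_singleton {α κ : Type} [LT κ] [DecidableLT κ]
    (xs : List α) (x : α) (key : α → κ) :
    PySem.List.sorted (xs ++ [x]) key false =
      PySem.List.insertBy (fun a b => decide (key a < key b)) x (PySem.List.sorted xs key false) := by
  simp [PySem.List.sorted, List.foldl_append]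

theorem pv_sorted2_append_singleton {α κ₁ κ₂ : Type} [LT κ₁] [DecidableLT κ₁] [LT κ₂] [DecidableLT κ₂]
    (xs : List α) (x : α) (k1 : α → κ₁) (k2 : α → κ₂) :
    PySem.List.sorted2 (xs ++ [x]) k1 k2 false =
      PySem.List.insertBy
        (fun a b => decide (k1 a < k1 b) || (!decide (k1 b < k1 a) && decide (k2 a < k2 b)))
        x (PySem.List.sorted2 xs k1 k2 false) := by
  simp [PySem.List.sorted2, List.foldl_append]

theorem pv_sorted_key_congr {α κ : Type} [LT κ] [DecidableLT κ]
    (l : List α) (k1 k2 : α → κ) (h : ∀ y ∈ l, k1 y = k2 y) :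
    PySem.List.sorted l k1 false = PySem.List.sorted l k2 false := by
  induction l using List.reverseRecOn with
  | nil => rfl
  | append_singleton l x ih =>
    rw [pv_sorted_append_singleton, pv_sorted_append_singleton,
      ih (fun y hy => h y (by simp [hy]))]
    apply pv_insertBy_congr
    intro y hy
    have hyl : y ∈ l := by
      have := (PySem.List.mem_sorted l k2 false y).mp hy
      exact this
    rw [h x (by simp), h y (by simp [hyl])]

theorem pv_map_sorted2 {α β κ₁ κ₂ : Type} [LT κ₁] [DecidableLT κ₁] [LT κ₂] [DecidableLT κ₂]
    (f : α → β) (l : List α) (k1 : β → κ₁) (k2 : β → κ₂) :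
    PySem.List.sorted2 (l.map f) k1 k2 false =
      (PySem.List.sorted2 l (fun a => k1 (f a)) (fun a => k2 (f a)) false).map f := by
  induction l using List.reverseRecOn with
  | nil => rfl
  | append_singleton l x ih =>
    rw [List.map_append, List.map_singleton, pv_sorted2_append_singleton,
      pv_sorted2_append_singleton, ih, pv_map_insertBy]

theorem pv_flatMap_congr {α β : Type} (l : List α) (f g : α → List β)
    (h : ∀ x ∈ l, f x = g x) : l.flatMap f = l.flatMap g := by
  induction l with
  | nil => rfl
  | cons a l ih =>
    simp only [List.flatMap_cons, h a (by simp), ih (fun y hy => h y (by simp [hy]))]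

theorem pv_pairwise_decomp (Q : List String) (q0 : String) (hQ : Q.Pairwise (· < ·)) :
    Q = Q.filter (fun q => decide (q < q0)) ++
        (Q.filter (fun q => q == q0) ++ Q.filter (fun q => decide (q0 < q))) := by
  induction Q with
  | nil => rfl
  | cons a Q ih =>
    have hrest : ∀ y ∈ Q, a < y := by
      intro y hy; exact (List.pairwise_cons.mp hQ).1 y hy
    have ih' := ih (List.pairwise_cons.mp hQ).2
    rcases lt_trichotomy a q0 with h | h | h
    · have h1 : decide (a < q0) = true := by simp [h]
      have h2 : (a == q0) = false := by simp [ne_of_lt h]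
      have h3 : decide (q0 < a) = false := by simp [not_lt_of_gt h]
      simp only [List.filter_cons, h1, h2, h3, if_true]
      simp only [Bool.false_eq_true, if_false, List.cons_append]
      rw [← ih']
    · subst h
      have h1 : decide (a < a) = false := by simp
      have h2 : (a == a) = true := by simp
      simp only [List.filter_cons, h1, h2, Bool.false_eq_true, if_false, if_true]
      have hlt : Q.filter (fun q => decide (q < a)) = [] := by
        apply List.filter_eq_nil_iff.mpr
        intro y hy; simp [not_lt_of_gt (hrest y hy)]
      have heq : Q.filter (fun q => q == a) = [] := by
        apply List.filter_eq_nil_iff.mpr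
        intro y hy; simp [(ne_of_gt (hrest y hy))]
      have hgt : Q.filter (fun q => decide (a < q)) = Q := by
        apply List.filter_eq_self.mpr
        intro y hy; simp [hrest y hy]
      rw [hlt, heq, hgt]
      simp
    · have h1 : decide (a < q0) = false := by simp [not_lt_of_gt h]
      have h2 : (a == q0) = false := by simp [ne_of_gt h]
      have h3 : decide (q0 < a) = true := by simp [h]
      simp only [List.filter_cons, h1, h2, h3, Bool.false_eq_true, if_false, if_true]
      have hlt : Q.filter (fun q => decide (q < q0)) = [] := by
        apply List.filter_eq_nil_iff.mpr
        intro y hy; simp [not_lt_of_gt (lt_trans h (hrest y hy))]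
      have heq : Q.filter (fun q => q == q0) = [] := by
        apply List.filter_eq_nil_iff.mpr
        intro y hy; simp [(ne_of_gt (lt_trans h (hrest y hy)))]
      have hgt : Q.filter (fun q => decide (q0 < q)) = Q := by
        apply List.filter_eq_self.mpr
        intro y hy; simp [lt_trans h (hrest y hy)]
      rw [hlt, heq, hgt]
      simp

theorem pv_filter_beq_of_not_mem (l : List String) (q0 : String) (h : q0 ∉ l) :
    l.filter (fun q => q == q0) = [] := by
  apply List.filter_eq_nil_iff.mpr
  intro y hy
  simp only [beq_iff_eq]
  exact fun he => h (he ▸ hy)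

theorem pv_filter_beq_of_nodup (l : List String) (q0 : String) (hnd : l.Nodup) (hmem : q0 ∈ l) :
    l.filter (fun q => q == q0) = [q0] := by
  induction l with
  | nil => cases hmem
  | cons a l ih =>
    rcases List.nodup_cons.mp hnd with ⟨hnotin, hnd'⟩
    by_cases ha : a = q0
    · subst ha
      simp only [List.filter_cons, beq_self_eq_true, if_true]
      rw [pv_filter_beq_of_not_mem l a hnotin]
    · have : (a == q0) = false := by simp [ha]
      simp only [List.filter_cons, this, Bool.false_eq_true, if_false]
      refine ih hnd' ?_
      rcases List.mem_cons.mp hmem with h | h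
      · exact absurd h.symm ha
      · exact h

theorem pv_sorted_singleton {α κ : Type} [LT κ] [DecidableLT κ] (x : α) (key : α → κ) :
    PySem.List.sorted [x] key false = [x] := by
  simp [PySem.List.sorted, PySem.List.insertBy]

theorem pv_sorted2_groupby {α : Type} (xs : List α) (p : α → String) (s : α → Int) :
    PySem.List.sorted2 xs p s false =
      (PySem.List.sorted (PySem.Set.ofList (xs.map p)) (fun q => q) false).flatMap
        (fun q => PySem.List.sorted (xs.filter (fun y => p y == q)) s false) := by
  induction xs using List.reverseRecOn with
  | nil => rfl
  | append_singleton xs x ih =>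
    set q0 := p x with hq0
    set P := PySem.Set.ofList (xs.map p) with hP
    set S := PySem.List.sorted P (fun q => q) false with hSdef
    set f : String → List α := fun q => PySem.List.sorted (xs.filter (fun y => p y == q)) s false with hf
    set f' : String → List α := fun q => PySem.List.sorted ((xs ++ [x]).filter (fun y => p y == q)) s false with hf'
    have hS : S.Pairwise (· < ·) := PySem.List.sorted_ofList_pairwise_lt (xs.map p)
    have hSnd : S.Nodup := hS.imp (fun h => ne_of_lt h)
    have hmemS : ∀ q, q ∈ S ↔ q ∈ xs.map p := by
      intro q
      rw [hSdef, PySem.List.mem_sorted, hP, PySem.Set.mem_ofList]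
    set A := S.filter (fun q => decide (q < q0)) with hA
    set Bq := S.filter (fun q => q == q0) with hB
    set C := S.filter (fun q => decide (q0 < q)) with hC
    have hdec : S = A ++ (Bq ++ C) := pv_pairwise_decomp S q0 hS
    have hmemA : ∀ q ∈ A, q < q0 := by
      intro q hq; have := List.mem_filter.mp hq; simpa using this.2
    have hmemC : ∀ q ∈ C, q0 < q := by
      intro q hq; have := List.mem_filter.mp hq; simpa using this.2
    -- the new ordered prefix list and the two block families
    have hf'_eq : ∀ q, q ≠ q0 → f' q = f q := by
      intro q hq
      have hx : (p x == q) = false := by simp; exact fun he => hq he.symm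
      simp only [hf', hf, List.filter_append, List.filter_cons, hx, Bool.false_eq_true, if_false,
        List.filter_nil, List.append_nil]
    have hf'A : ∀ q ∈ A, f' q = f q := fun q hq => hf'_eq q (ne_of_lt (hmemA q hq))
    have hf'C : ∀ q ∈ C, f' q = f q := fun q hq => hf'_eq q (ne_of_gt (hmemC q hq))
    have hfq0 : f' q0 =
        PySem.List.insertBy (fun a b => decide (s a < s b)) x (f q0) := by
      have hx : (p x == q0) = true := by simp [hq0]
      simp only [hf', hf, List.filter_append, List.filter_cons, hx, if_true, List.filter_nil]
      exact pv_sorted_append_singleton _ x s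
    -- membership in blocks pins the prefix
    have hblock : ∀ q y, y ∈ f q → p y = q := by
      intro q y hy
      rw [hf, PySem.List.mem_sorted] at hy
      have := List.mem_filter.mp hy
      simpa using this.2
    set lt : α → α → Bool := fun a b => decide (p a < p b) || (!decide (p b < p a) && decide (s a < s b)) with hlt
    have hltA : ∀ y ∈ A.flatMap f, lt x y = false := by
      intro y hy
      rcases List.mem_flatMap.mp hy with ⟨q, hqA, hyf⟩
      have hpy : p y = q := hblock q y hyf
      have h1 : q < q0 := hmemA q hqA
      have h2 : (decide (q0 < q)) = false := decide_eq_false (not_lt_of_gt h1)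
      have h3 : (decide (q < q0)) = true := decide_eq_true h1
      simp only [hlt, hpy, ← hq0, h2, h3]
      rfl
    have hltC : ∀ y ∈ C.flatMap f, lt x y = true := by
      intro y hy
      rcases List.mem_flatMap.mp hy with ⟨q, hqC, hyf⟩
      have hpy : p y = q := hblock q y hyf
      have h1 : q0 < q := hmemC q hqC
      simp only [hlt, hpy, ← hq0, decide_eq_true h1]
      rfl
    have hLHS : PySem.List.sorted2 (xs ++ [x]) p s false =
        PySem.List.insertBy lt x (A.flatMap f ++ (Bq.flatMap f ++ C.flatMap f)) := by
      rw [pv_sorted2_append_singleton, ih, hdec]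
      simp only [List.flatMap_append]
      rfl
    by_cases hq : q0 ∈ xs.map p
    · -- old prefix: the prefix list is unchanged, x is inserted into its block
      have hPnew : PySem.Set.ofList ((xs ++ [x]).map p) = P := by
        rw [List.map_append, List.map_singleton, PySem.Set.ofList_append_singleton, ← hP]
        have hmem : q0 ∈ P := (PySem.Set.mem_ofList _ _).mpr hq
        simp [PySem.Set.add, PySem.Set.contains, ← hq0, hmem]
      have hBq : Bq = [q0] := by
        rw [hB]
        exact pv_filter_beq_of_nodup S q0 hSnd ((hmemS q0).mpr hq)
      rw [hLHS, hBq]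
      have hmid := pv_insertBy_middle lt x (A.flatMap f) (f q0) (C.flatMap f) hltA hltC
      simp only [List.flatMap_cons, List.flatMap_nil, List.append_nil] at hmid ⊢
      rw [hmid]
      have hcongr : PySem.List.insertBy lt x (f q0) =
          PySem.List.insertBy (fun a b => decide (s a < s b)) x (f q0) := by
        apply pv_insertBy_congr
        intro y hy
        have hpy : p y = q0 := hblock q0 y hy
        have h2 : (decide (q0 < q0)) = false := decide_eq_false (lt_irrefl q0)
        simp only [hlt, hpy, ← hq0, h2]
        rfl
      rw [hcongr, ← hfq0, hPnew, ← hSdef, hdec, hBq]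
      simp only [List.flatMap_append, List.flatMap_cons, List.flatMap_nil, List.append_nil]
      rw [pv_flatMap_congr A f' f hf'A, pv_flatMap_congr C f' f hf'C]
    · -- new prefix: q0 is inserted into the prefix list with the singleton block [x]
      have hgrp0 : xs.filter (fun y => p y == q0) = [] := by
        apply List.filter_eq_nil_iff.mpr
        intro y hy
        simp only [beq_iff_eq]
        exact fun he => hq (he ▸ List.mem_map_of_mem hy)
      have hfq0' : f q0 = [] := by
        show PySem.List.sorted (xs.filter (fun y => p y == q0)) s false = []
        rw [hgrp0]; rfl
      have hBq : Bq = [] := by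
        rw [hB]
        exact pv_filter_beq_of_not_mem S q0 (fun hc => hq ((hmemS q0).mp hc))
      have hPnew : PySem.Set.ofList ((xs ++ [x]).map p) = P ++ [q0] := by
        rw [List.map_append, List.map_singleton, PySem.Set.ofList_append_singleton, ← hP]
        have hnmem : q0 ∉ P := fun hc => hq ((PySem.Set.mem_ofList _ _).mp hc)
        simp [PySem.Set.add, PySem.Set.contains, ← hq0, hnmem]
      have hSnew : PySem.List.sorted (P ++ [q0]) (fun q => q) false = A ++ ([q0] ++ C) := by
        rw [pv_sorted_append_singleton, ← hSdef]
        have := pv_insertBy_middle (fun a b => decide (a < b)) q0 A [] C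
          (fun y hy => decide_eq_false (not_lt_of_gt (hmemA y hy)))
          (fun y hy => decide_eq_true (hmemC y hy))
        rw [hdec, hBq]
        simpa [PySem.List.insertBy] using this
      have hfx : f' q0 = [x] := by
        have hx : (p x == q0) = true := by simp [hq0]
        show PySem.List.sorted ((xs ++ [x]).filter (fun y => p y == q0)) s false = [x]
        rw [List.filter_append, hgrp0]
        simp only [List.filter_cons, hx, if_true, List.filter_nil, List.nil_append]
        exact pv_sorted_singleton x s
      rw [hLHS, hBq, hPnew, hSnew]
      have hmid := pv_insertBy_middle lt x (A.flatMap f) [] (C.flatMap f) hltA hltC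
      rw [show List.flatMap f ([] : List String) = [] from rfl, hmid]
      simp only [List.flatMap_append, List.flatMap_cons, List.flatMap_nil, List.append_nil]
      rw [pv_flatMap_congr A f' f hf'A, pv_flatMap_congr C f' f hf'C, hfx]
      simp [PySem.List.insertBy]

theorem pv_dict_ofList_items {κ ν : Type} [BEq κ] [LawfulBEq κ] (l : List (κ × ν))
    (h : (l.map Prod.fst).Nodup) : (PySem.Dict.ofList l).items = l := by
  have := PySem.Dict.items_foldl_insert_fresh l Prod.fst Prod.snd PySem.Dict.empty
    (fun a _ => PySem.Dict.contains_empty a.1) h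
  simp only [PySem.Dict.ofList, PySem.Dict.update]
  simpa using this

theorem pv_keys_ofList (nd : List (String × String)) :
    (PySem.Dict.ofList nd).keys = (PySem.Dict.ofList nd).items.map Prod.fst := rfl

theorem pv_lkp_mem (nd : List (String × String)) (h : (nd.map (fun kv => kv.1)).Nodup)
    (kv : String × String) (hm : kv ∈ nd) : pvLkp nd kv.1 = kv.2 := by
  have hitems : (PySem.Dict.ofList nd).items = nd := pv_dict_ofList_items nd (by simpa using h)
  have hknd : (PySem.Dict.ofList nd).keys.Nodup := by
    rw [pv_keys_ofList, hitems]; simpa using h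
  exact PySem.Dict.getD_of_mem_items (PySem.Dict.ofList nd)
    (by rw [hitems]; simpa using hm) hknd ""

-- the grouping dict A builds: its lookups are the prefix-filtered key lists, its keys the distinct prefixes
theorem pv_modify_step (d : PySem.Dict String (List String)) (k nm : String) :
    ((if d.contains k then d else d.insert k []).modify k [] (fun l => l ++ [nm]))
      = d.modify k [] (fun l => l ++ [nm]) := by
  by_cases h : d.contains k
  · simp [h]
  · simp only [Bool.not_eq_true] at h
    simp only [h, Bool.false_eq_true, if_false, PySem.Dict.modify]
    rw [PySem.Dict.getD_insert_self, PySem.Dict.insert_insert_self,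
        PySem.Dict.getD_of_not_contains d [] h]

theorem pv_names_eq (nd : List (String × String)) :
    (nd.foldl (fun names kv =>
      let name := kv.1
      let key_name : String :=
        if PySem.Str.isIn "-" name then PySem.List.pyGetD ((PySem.Str.split? name "-").getD []) 0 ""
        else name
      let names := if names.contains key_name then names else names.insert key_name []
      names.modify key_name [] (fun l => l ++ [name])) PySem.Dict.empty)
    = (nd.map (fun kv => (pvPref kv.1, kv.1))).foldl
        (fun d pr => d.modify pr.1 [] (fun l => l ++ [pr.2])) PySem.Dict.empty := by
  rw [List.foldl_map]
  apply PySem.List.foldl_congr_mem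
  intro acc kv _
  exact pv_modify_step acc (pvPref kv.1) kv.1

theorem pv_keys_foldl_modify {beta : Type} (l : List beta) (k : beta → String)
    (f : beta → List String → List String) (d : PySem.Dict String (List String)) :
    (l.foldl (fun d a => d.modify (k a) [] (f a)) d).keys = PySem.Set.update d.keys (l.map k) := by
  induction l generalizing d with
  | nil => rfl
  | cons a l ih =>
    rw [List.foldl_cons, ih, List.map_cons, PySem.Set.update_cons]
    congr 1
    by_cases h : k a ∈ d.keys
    · have hc : d.contains (k a) = true := by
        rw [PySem.Dict.contains_eq_decide_mem_keys]; simp [h]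
      have hc' : PySem.Set.contains d.keys (k a) = true := by
        simp [PySem.Set.contains, h]
      simp only [PySem.Dict.modify, PySem.Set.add, hc']
      rw [PySem.Dict.keys_insert_of_contains d _ hc]
      simp
    · have hc : d.contains (k a) = false := by
        rw [PySem.Dict.contains_eq_decide_mem_keys]; simp [h]
      have hc' : PySem.Set.contains d.keys (k a) = false := by
        simp [PySem.Set.contains, h]
      simp only [PySem.Dict.modify, PySem.Set.add, hc']
      rw [PySem.Dict.keys_insert_of_not_contains d _ hc]
      simp

theorem pv_names_getD (nd : List (String × String)) (q : String) :
    (nd.foldl (fun names kv =>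
      let name := kv.1
      let key_name : String :=
        if PySem.Str.isIn "-" name then PySem.List.pyGetD ((PySem.Str.split? name "-").getD []) 0 ""
        else name
      let names := if names.contains key_name then names else names.insert key_name []
      names.modify key_name [] (fun l => l ++ [name])) PySem.Dict.empty).getD q []
    = pvGrp (pvKeys nd) q := by
  rw [pv_names_eq, PySem.Dict.getD_foldl_modify_append]
  simp [pvGrp, pvKeys, List.filter_map, List.map_map, Function.comp_def]

theorem pv_names_keys (nd : List (String × String)) :
    (nd.foldl (fun names kv =>
      let name := kv.1
      let key_name : String :=
        if PySem.Str.isIn "-" name then PySem.List.pyGetD ((PySem.Str.split? name "-").getD []) 0 ""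
        else name
      let names := if names.contains key_name then names else names.insert key_name []
      names.modify key_name [] (fun l => l ++ [name])) PySem.Dict.empty).keys
    = PySem.Set.ofList ((pvKeys nd).map pvPref) := by
  rw [pv_names_eq, pv_keys_foldl_modify (k := Prod.fst) (f := fun pr l => l ++ [pr.2])]
  rw [PySem.Dict.keys_empty]
  show PySem.Set.update PySem.Set.empty _ = _
  rw [PySem.Set.update_empty]
  simp [pvKeys, List.map_map, Function.comp_def]

theorem pv_grp_ne_nil (nd : List (String × String)) (q : String)
    (hq : q ∈ (pvKeys nd).map pvPref) : pvGrp (pvKeys nd) q ≠ [] := by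
  rcases List.mem_map.mp hq with ⟨n, hn, hpn⟩
  intro hnil
  have : n ∈ pvGrp (pvKeys nd) q := by
    simp only [pvGrp, List.mem_filter]
    exact ⟨hn, by simp [hpn]⟩
  rw [hnil] at this
  cases this

theorem pv_count_eq_grp_length (nd : List (String × String)) (n : String) (q : String)
    (hpn : pvPref n = q) :
    ((pvKeys nd).map pvPref).count (pvPref n) = (pvGrp (pvKeys nd) q).length := by
  rw [hpn, pvGrp]
  rw [List.count_eq_countP, List.countP_map, ← List.countP_eq_length_filter]
  congr 1

theorem pv_sb_of_mem_grp (nd : List (String × String)) (q : String)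
    (hlen : 1 < (pvGrp (pvKeys nd) q).length) (n : String) (hn : n ∈ pvGrp (pvKeys nd) q) :
    pvSB nd n = pvSufInt n := by
  have hpn : pvPref n = q := by
    have := (List.mem_filter.mp hn).2
    simpa using this
  rw [pvSB, if_pos]
  rw [pv_count_eq_grp_length nd n q hpn]
  exact hlen

theorem pv_A_eq (nd : List (String × String)) (h : Pre_sort_by_name nd) :
    sort_by_name nd =
      (PySem.List.sorted2 (pvKeys nd) pvPref (pvSB nd) false).map (fun n => (n, pvLkp nd n)) := by
  obtain ⟨hnd, -⟩ := h
  simp only [sort_by_name]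
  rw [pv_names_keys]
  have hbody : ∀ (acc : PySem.Dict String String),
      ∀ q ∈ PySem.List.sorted (PySem.Set.ofList ((pvKeys nd).map pvPref)) (fun x => x) false,
      (fun result n_str =>
        if 1 < ((nd.foldl (fun names kv =>
            let name := kv.1
            let key_name : String :=
              if PySem.Str.isIn "-" name then
                PySem.List.pyGetD ((PySem.Str.split? name "-").getD []) 0 ""
              else name
            let names := if names.contains key_name then names else names.insert key_name []
            names.modify key_name [] (fun l => l ++ [name])) PySem.Dict.empty).getD n_str []).length then
          (PySem.List.sorted ((nd.foldl (fun names kv =>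
              let name := kv.1
              let key_name : String :=
                if PySem.Str.isIn "-" name then
                  PySem.List.pyGetD ((PySem.Str.split? name "-").getD []) 0 ""
                else name
              let names := if names.contains key_name then names else names.insert key_name []
              names.modify key_name [] (fun l => l ++ [name])) PySem.Dict.empty).getD n_str [])
            (fun nb => (PySem.Int.ofStr? (PySem.List.pyGetD ((PySem.Str.split? nb "-").getD []) 1 "")).getD 0)
            false).foldl
            (fun result n => result.insert n ((PySem.Dict.ofList nd).getD n "")) result
        else
          result.insert
            (PySem.List.pyGetD ((nd.foldl (fun names kv =>
              let name := kv.1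
              let key_name : String :=
                if PySem.Str.isIn "-" name then
                  PySem.List.pyGetD ((PySem.Str.split? name "-").getD []) 0 ""
                else name
              let names := if names.contains key_name then names else names.insert key_name []
              names.modify key_name [] (fun l => l ++ [name])) PySem.Dict.empty).getD n_str []) 0 "")
            ((PySem.Dict.ofList nd).getD
              (PySem.List.pyGetD ((nd.foldl (fun names kv =>
                let name := kv.1
                let key_name : String :=
                  if PySem.Str.isIn "-" name then
                    PySem.List.pyGetD ((PySem.Str.split? name "-").getD []) 0 ""
                  else name
                let names := if names.contains key_name then names else names.insert key_name []
                names.modify key_name [] (fun l => l ++ [name])) PySem.Dict.empty).getD n_str []) 0 "") ""))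
          acc q
      = (PySem.List.sorted ((pvKeys nd).filter (fun y => pvPref y == q)) (pvSB nd) false).foldl
          (fun r n => r.insert n (pvLkp nd n)) acc := by
    intro acc q hqS
    have hqmem : q ∈ (pvKeys nd).map pvPref := by
      have := (PySem.List.mem_sorted _ _ _ q).mp hqS
      exact (PySem.Set.mem_ofList _ _).mp this
    simp only [pv_names_getD nd q]
    by_cases hlen : 1 < (pvGrp (pvKeys nd) q).length
    · rw [if_pos hlen]
      have hkeys : PySem.List.sorted (pvGrp (pvKeys nd) q)
          (fun nb => (PySem.Int.ofStr? (PySem.List.pyGetD ((PySem.Str.split? nb "-").getD []) 1 "")).getD 0)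
          false
          = PySem.List.sorted (pvGrp (pvKeys nd) q) (pvSB nd) false := by
        apply pv_sorted_key_congr
        intro y hy
        exact (pv_sb_of_mem_grp nd q hlen y hy).symm
      rw [hkeys]
      rfl
    · rw [if_neg hlen]
      rw [show List.filter (fun y => pvPref y == q) (pvKeys nd) = pvGrp (pvKeys nd) q from rfl]
      have hne := pv_grp_ne_nil nd q hqmem
      rcases hgrp : pvGrp (pvKeys nd) q with _ | ⟨y, t⟩
      · exact absurd hgrp hne
      · have hle : (y :: t).length ≤ 1 := by
          rw [← hgrp]
          exact Nat.not_lt.mp hlen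
        have ht : t = [] := by
          cases t with
          | nil => rfl
          | cons a b => simp at hle
        subst ht
        rw [pv_sorted_singleton]
        simp [PySem.List.pyGetD_zero_cons, pvLkp]
  rw [PySem.List.foldl_congr_mem _ _ _ _ hbody, ← List.foldl_flatMap,
    ← pv_sorted2_groupby (pvKeys nd) pvPref (pvSB nd)]
  have hperm := PySem.List.sorted2_perm (pvKeys nd) pvPref (pvSB nd) false
  have hnodupL : ((PySem.List.sorted2 (pvKeys nd) pvPref (pvSB nd) false).map (fun n => n)).Nodup := by
    simp only [List.map_id']
    exact hperm.nodup_iff.mpr hnd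
  have hitems := PySem.Dict.items_foldl_insert_fresh
    (PySem.List.sorted2 (pvKeys nd) pvPref (pvSB nd) false) (fun n => n) (fun n => pvLkp nd n)
    PySem.Dict.empty (fun a _ => PySem.Dict.contains_empty a) hnodupL
  simpa using hitems

theorem pv_alt_counts (nd : List (String × String)) (q : String) :
    (nd.foldl (fun counts kv =>
      counts.insert (pvPref kv.1) (counts.getD (pvPref kv.1) 0 + 1))
        (PySem.Dict.empty : PySem.Dict String Int)).getD q 0
    = (((pvKeys nd).map pvPref).count q : Int) := by
  have hfold : (nd.foldl (fun counts kv =>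
      counts.insert (pvPref kv.1) (counts.getD (pvPref kv.1) 0 + 1))
        (PySem.Dict.empty : PySem.Dict String Int))
      = ((nd.map (fun kv => pvPref kv.1)).foldl
          (fun d x => d.insert x (d.getD x 0 + 1)) (PySem.Dict.empty : PySem.Dict String Int)) := by
    rw [List.foldl_map]
  rw [hfold, PySem.Dict.getD_foldl_insert_add_one]
  simp [pvKeys, List.map_map, Function.comp_def]

theorem pv_alt_key (nd : List (String × String)) (kv : String × String) :
    (if 1 < (nd.foldl (fun counts kv =>
        counts.insert (pvPref kv.1) (counts.getD (pvPref kv.1) 0 + 1))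
          (PySem.Dict.empty : PySem.Dict String Int)).getD (pvPref kv.1) 0
     then pvSufInt kv.1 else 0) = pvSB nd kv.1 := by
  rw [pv_alt_counts, pvSB]
  norm_cast

theorem pv_nd_eq_map (nd : List (String × String)) (hnd : (nd.map (fun kv => kv.1)).Nodup) :
    nd = (pvKeys nd).map (fun n => (n, pvLkp nd n)) := by
  show nd = (nd.map (fun kv => kv.1)).map (fun n => (n, pvLkp nd n))
  rw [List.map_map]
  have : ∀ kv ∈ nd, ((fun n => (n, pvLkp nd n)) ∘ fun kv => kv.1) kv = id kv := by
    intro kv hkv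
    simp [pv_lkp_mem nd hnd kv hkv]
  rw [List.map_congr_left this, List.map_id]

theorem pv_B_eq (nd : List (String × String)) (h : Pre_sort_by_name nd) :
    sort_by_name_alt nd =
      (PySem.List.sorted2 (pvKeys nd) pvPref (pvSB nd) false).map (fun n => (n, pvLkp nd n)) := by
  obtain ⟨hnd, -⟩ := h
  simp only [sort_by_name_alt]
  rw [show (fun kv : String × String => if 1 < (nd.foldl (fun counts kv =>
        counts.insert (pvPref kv.1) (counts.getD (pvPref kv.1) 0 + 1))
          (PySem.Dict.empty : PySem.Dict String Int)).getD (pvPref kv.1) 0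
      then pvSufInt kv.1 else 0) = (fun kv : String × String => pvSB nd kv.1)
    from funext (pv_alt_key nd)]
  have hperm := PySem.List.sorted2_perm nd (fun kv => pvPref kv.1) (fun kv => pvSB nd kv.1) false
  have hnodup : ((PySem.List.sorted2 nd (fun kv => pvPref kv.1) (fun kv => pvSB nd kv.1) false).map
      Prod.fst).Nodup := ((hperm.map Prod.fst).nodup_iff).mpr hnd
  rw [pv_dict_ofList_items _ hnodup]
  have hrw : PySem.List.sorted2 nd (fun kv => pvPref kv.1) (fun kv => pvSB nd kv.1) false
      = PySem.List.sorted2 ((pvKeys nd).map (fun n => (n, pvLkp nd n)))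
          (fun kv => pvPref kv.1) (fun kv => pvSB nd kv.1) false := by
    rw [← pv_nd_eq_map nd hnd]
  rw [hrw, pv_map_sorted2]

-- ===== VERDICT (by name: the statement is the Claim_ definition above) =====
theorem sort_by_name_spec : Claim_equal_sort_by_name := by
  intro nd _ hpre
  unfold Spec_sort_by_name
  rw [pv_A_eq nd hpre, pv_B_eq nd hpre]
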